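-- pv_equiv track=rewrite | github.com/HsuTzu26/wsi2dcm | api/iSyntax/sdk/patch_extraction.py | create_patch_list
-- ===== SOURCE A (Python) =====
-- def create_patch_list(num_y_tiles, num_x_tiles, tile_size, starting_indices, level):
--     """
--     Create patch(es) and patch identifier lists
--     :param num_y_tiles: Number of tiles along y-axis
--     :param num_x_tiles:number of tiles along x-axis
--     :param tile_size: Tile size
--     :param starting_indices: Starting co-ordinates
--     :param level: Level
--     :return: patch list and patch identifier list
--     """
--     patches = []
--     # Spilt the Region of Interest into multiple Tiles i.e. Patches as
--     # per the User Defined Patch Size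
--     y_spatial = 0
--     # View Range is defined as a closed set i.e. the start and end index is inclusive
--     # For example, for Tile size of 512, First Tile range is 0 to 511,
--     # Next Tile Range is 512 to 1023 ...
--     for y_counter in range(num_y_tiles):
--         y_patch_start = starting_indices[1] + (y_counter * tile_size[1])
--         y_patch_end = (y_patch_start + tile_size[1]) - (2 ** level)
--         x_spatial = 0
--         for x_counter in range(num_x_tiles):
--             x_patch_start = starting_indices[0] + (x_counter * tile_size[0])
--             x_patch_end = (x_patch_start + tile_size[0]) - (2 ** level)
--             patch = [x_patch_start, x_patch_end, y_patch_start, y_patch_end, level]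
--             patches.append(patch)
--             # Associating spatial information to the patchList in order to
--             # identify the patches returned asynchronously
--             x_spatial += 1
--         y_spatial += 1
--
--     return patches
-- ===== SOURCE B (Python) =====
-- def create_patch_list(num_y_tiles, num_x_tiles, tile_size, starting_indices, level):
--     # Translation method: build the single top-left cell, grow the first row by
--     # repeatedly shifting its last cell right by tile_size[0], then grow the grid
--     # by repeatedly shifting the previous row down by tile_size[1].
--     if num_y_tiles <= 0 or num_x_tiles <= 0:
--         return []
--     step = 2 ** level
--     dx, dy = tile_size[0], tile_size[1]
--     sx, sy = starting_indices[0], starting_indices[1]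
--     row = [[sx, sx + dx - step, sy, sy + dy - step, level]]
--     for _ in range(num_x_tiles - 1):
--         p = row[-1]
--         row.append([p[0] + dx, p[1] + dx, p[2], p[3], p[4]])
--     out = list(row)
--     prev = row
--     for _ in range(num_y_tiles - 1):
--         prev = [[q[0], q[1], q[2] + dy, q[3] + dy, q[4]] for q in prev]
--         out.extend(prev)
--     return out
-- ===== Notes on version B (the rewrite author's own statement) =====
-- stated objective: alternative
-- what changed: B replaces A's per-cell closed-form recomputation (start = origin + counter*size inside two nested loops) with an incremental translation algorithm: it builds the single corner cell, generates the first row by repeatedly shifting the last cell right by tile_size[0], and generates each further row by shifting the whole previous row down by tile_size[1].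
-- outside the precondition, e.g. on create_patch_list(1, 1, [4, 5], [0, 0], -1): A returns [[0, 3.5, 0, 4.5, -1]], B returns [[0, 3.5, 0, 4.5, -1]]
import Mathlib
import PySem

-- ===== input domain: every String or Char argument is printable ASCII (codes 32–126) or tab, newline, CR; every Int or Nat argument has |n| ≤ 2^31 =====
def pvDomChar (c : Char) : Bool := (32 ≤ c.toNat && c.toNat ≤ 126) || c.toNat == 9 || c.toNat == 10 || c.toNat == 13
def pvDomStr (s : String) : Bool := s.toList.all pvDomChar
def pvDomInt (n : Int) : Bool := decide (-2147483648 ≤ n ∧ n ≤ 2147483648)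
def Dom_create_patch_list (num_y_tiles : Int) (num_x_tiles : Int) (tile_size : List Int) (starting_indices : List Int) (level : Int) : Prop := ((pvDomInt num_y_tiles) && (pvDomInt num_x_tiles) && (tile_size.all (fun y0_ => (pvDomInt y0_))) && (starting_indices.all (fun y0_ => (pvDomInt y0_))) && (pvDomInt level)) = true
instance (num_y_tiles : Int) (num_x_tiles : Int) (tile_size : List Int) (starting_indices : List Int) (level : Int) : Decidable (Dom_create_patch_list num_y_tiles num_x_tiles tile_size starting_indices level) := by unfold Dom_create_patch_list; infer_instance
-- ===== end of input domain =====

-- B replaces A's per-cell closed-form recomputation with an incremental translation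
-- algorithm (corner cell, shift right to build row 0, shift each row down); objective: alternative.

-- ===== PORT A =====
-- Literal port of A: nested foldl over range(num_y)/range(num_x) carrying the
-- (patches, spatial-counter) state exactly as the Python does; list indexing via
-- pyGetD (exact under Pre_, which guarantees the indices are in range), 2**level
-- as 2 ^ level.toNat (exact under Pre_, which guarantees 0 ≤ level where it is used).
def create_patch_list (num_y_tiles : Int) (num_x_tiles : Int) (tile_size : List Int) (starting_indices : List Int) (level : Int) : List (List Int) :=
  ((PySem.List.pyRange 0 num_y_tiles 1).foldl
    (fun (st : List (List Int) × Int) y_counter =>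
      let y_patch_start := PySem.List.pyGetD starting_indices 1 0 + y_counter * PySem.List.pyGetD tile_size 1 0
      let y_patch_end := (y_patch_start + PySem.List.pyGetD tile_size 1 0) - 2 ^ level.toNat
      let inner := (PySem.List.pyRange 0 num_x_tiles 1).foldl
        (fun (st2 : List (List Int) × Int) x_counter =>
          let x_patch_start := PySem.List.pyGetD starting_indices 0 0 + x_counter * PySem.List.pyGetD tile_size 0 0
          let x_patch_end := (x_patch_start + PySem.List.pyGetD tile_size 0 0) - 2 ^ level.toNat
          (st2.1 ++ [[x_patch_start, x_patch_end, y_patch_start, y_patch_end, level]], st2.2 + 1))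
        (st.1, (0 : Int))
      (inner.1, st.2 + 1))
    ([], (0 : Int))).1

-- ===== PORT B =====
-- Literal port of B (Source B): translation algorithm — the corner cell, the first row
-- grown by shifting its last cell (row[-1], always nonempty, so getLastD is exact)
-- right by tile_size[0], further rows by shifting the previous row down by tile_size[1].
def create_patch_list_alt (num_y_tiles : Int) (num_x_tiles : Int) (tile_size : List Int) (starting_indices : List Int) (level : Int) : List (List Int) :=
  if num_y_tiles ≤ 0 ∨ num_x_tiles ≤ 0 then []
  else
    let step : Int := 2 ^ level.toNat
    let dx := PySem.List.pyGetD tile_size 0 0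
    let dy := PySem.List.pyGetD tile_size 1 0
    let sx := PySem.List.pyGetD starting_indices 0 0
    let sy := PySem.List.pyGetD starting_indices 1 0
    let row := (PySem.List.pyRange 0 (num_x_tiles - 1) 1).foldl
      (fun (r : List (List Int)) _ =>
        let p := r.getLastD []
        r ++ [[PySem.List.pyGetD p 0 0 + dx, PySem.List.pyGetD p 1 0 + dx,
               PySem.List.pyGetD p 2 0, PySem.List.pyGetD p 3 0, PySem.List.pyGetD p 4 0]])
      [[sx, sx + dx - step, sy, sy + dy - step, level]]
    ((PySem.List.pyRange 0 (num_y_tiles - 1) 1).foldl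
      (fun (st : List (List Int) × List (List Int)) _ =>
        let prev := st.2.map (fun q =>
          [PySem.List.pyGetD q 0 0, PySem.List.pyGetD q 1 0,
           PySem.List.pyGetD q 2 0 + dy, PySem.List.pyGetD q 3 0 + dy, PySem.List.pyGetD q 4 0])
        (st.1 ++ prev, prev))
      (row, row)).1

-- ===== PRECONDITION & SPEC =====
-- Pre_ excludes exactly the inputs where the Python A does not return a list of ints:
-- when num_y_tiles > 0 it needs index 1 of both lists (IndexError otherwise), and when
-- additionally num_x_tiles > 0 a negative level makes 2**level a float (non-int output).
def Pre_create_patch_list (num_y_tiles : Int) (num_x_tiles : Int) (tile_size : List Int) (starting_indices : List Int) (level : Int) : Prop :=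
  num_y_tiles ≤ 0 ∨ (2 ≤ tile_size.length ∧ 2 ≤ starting_indices.length ∧ (num_x_tiles ≤ 0 ∨ 0 ≤ level))
instance (num_y_tiles : Int) (num_x_tiles : Int) (tile_size : List Int) (starting_indices : List Int) (level : Int) : Decidable (Pre_create_patch_list num_y_tiles num_x_tiles tile_size starting_indices level) := by unfold Pre_create_patch_list; infer_instance
def pvWitness_create_patch_list : Int × Int × List Int × List Int × Int := (2, 3, [4, 5], [10, 20], 1)

def Spec_create_patch_list (num_y_tiles : Int) (num_x_tiles : Int) (tile_size : List Int) (starting_indices : List Int) (level : Int) (out : List (List Int)) : Prop := out = create_patch_list_alt num_y_tiles num_x_tiles tile_size starting_indices level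
instance (num_y_tiles : Int) (num_x_tiles : Int) (tile_size : List Int) (starting_indices : List Int) (level : Int) (out : List (List Int)) : Decidable (Spec_create_patch_list num_y_tiles num_x_tiles tile_size starting_indices level out) := by unfold Spec_create_patch_list; infer_instance

-- ===== CLAIM (what is proved, stated in full; the proofs are below) =====
def Claim_equal_create_patch_list : Prop := ∀ (num_y_tiles : Int) (num_x_tiles : Int) (tile_size : List Int) (starting_indices : List Int) (level : Int), Dom_create_patch_list num_y_tiles num_x_tiles tile_size starting_indices level → Pre_create_patch_list num_y_tiles num_x_tiles tile_size starting_indices level → Spec_create_patch_list num_y_tiles num_x_tiles tile_size starting_indices level (create_patch_list num_y_tiles num_x_tiles tile_size starting_indices level)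

-- ===== LEMMAS AND PROOFS =====

-- A's inner loop appends one row per x_counter: its patches component is acc ++ map.
theorem cpl_inner_fold (xr : List Int) (row : Int → List Int) :
    ∀ (acc : List (List Int)) (c : Int),
      (xr.foldl (fun (st2 : List (List Int) × Int) x => (st2.1 ++ [row x], st2.2 + 1)) (acc, c)).1
        = acc ++ xr.map row := by
  induction xr with
  | nil => intro acc c; simp
  | cons x xt ih => intro acc c; simp [List.foldl_cons, ih]

-- A loop that extends the patches component by a block per element flattens to flatMap.
theorem cpl_block_fold (l : List Int) (g : Int → List (List Int)) :
    ∀ (acc : List (List Int)) (c : Int),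
      (l.foldl (fun (st : List (List Int) × Int) y => (st.1 ++ g y, st.2 + 1)) (acc, c)).1
        = acc ++ l.flatMap g := by
  induction l with
  | nil => intro acc c; simp
  | cons y yt ih => intro acc c; simp [List.foldl_cons, ih]

-- A's outer loop extends patches by one full row-block per y_counter.
theorem cpl_outer_fold (yr xr : List Int) (row : Int → Int → List Int) (acc : List (List Int)) (c : Int) :
      (yr.foldl (fun (st : List (List Int) × Int) y =>
          ((xr.foldl (fun (st2 : List (List Int) × Int) x => (st2.1 ++ [row y x], st2.2 + 1)) (st.1, (0 : Int))).1,
           st.2 + 1)) (acc, c)).1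
        = acc ++ yr.flatMap (fun y => xr.map (row y)) := by
  simp only [cpl_inner_fold]
  exact cpl_block_fold yr (fun y => xr.map (row y)) acc c

-- B's first loop: appending f of the last element m times to the prefix (range (n+1)).map c
-- of the orbit of f yields the prefix of length n+1+m.
theorem cpl_last_fold {α : Type} (f : α → α) (c : ℕ → α) (d : α)
    (hf : ∀ n, f (c n) = c (n + 1)) :
    ∀ (l : List Int) (n : ℕ),
      l.foldl (fun r _ => r ++ [f (r.getLastD d)]) ((List.range (n + 1)).map c)
        = (List.range (n + 1 + l.length)).map c := by
  intro l
  induction l with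
  | nil => intro n; simp
  | cons a t ih =>
    intro n
    have hlast : (((List.range (n + 1)).map c).getLastD d) = c n := by
      rw [List.range_succ]; simp
    rw [List.foldl_cons, hlast, hf]
    have hstep : ((List.range (n + 1)).map c) ++ [c (n + 1)] = (List.range (n + 2)).map c := by
      rw [List.range_succ (n := n + 1)]; simp
    rw [hstep, ih (n + 1)]
    simp only [List.length_cons]
    congr 2
    omega

-- B's second loop: state (out, prev) with prev the current row of the orbit of g;
-- out accumulates the flattened orbit prefix.
theorem cpl_prev_fold (g : List (List Int) → List (List Int)) (r : ℕ → List (List Int))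
    (hg : ∀ n, g (r n) = r (n + 1)) :
    ∀ (l : List Int) (n : ℕ),
      (l.foldl (fun (st : List (List Int) × List (List Int)) _ => (st.1 ++ g st.2, g st.2))
          ((List.range (n + 1)).flatMap r, r n)).1
        = (List.range (n + 1 + l.length)).flatMap r := by
  intro l
  induction l with
  | nil => intro n; simp
  | cons a t ih =>
    intro n
    rw [List.foldl_cons]
    simp only [hg]
    have hstep : ((List.range (n + 1)).flatMap r) ++ r (n + 1) = (List.range (n + 2)).flatMap r := by
      rw [List.range_succ (n := n + 1)]; simp
    rw [hstep, ih (n + 1)]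
    simp only [List.length_cons]
    congr 2
    omega

-- Closed form of B: the grid as flatMap over rows of mapped cells.
theorem cpl_alt_closed (ny nx : Int) (ts si : List Int) (lvl : Int) (hy : 0 < ny) (hx : 0 < nx) :
    create_patch_list_alt ny nx ts si lvl
      = (List.range ny.toNat).flatMap (fun j : ℕ => (List.range nx.toNat).map (fun i : ℕ =>
          [PySem.List.pyGetD si 0 0 + (i : Int) * PySem.List.pyGetD ts 0 0,
           PySem.List.pyGetD si 0 0 + (i : Int) * PySem.List.pyGetD ts 0 0 + PySem.List.pyGetD ts 0 0 - 2 ^ lvl.toNat,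
           PySem.List.pyGetD si 1 0 + (j : Int) * PySem.List.pyGetD ts 1 0,
           PySem.List.pyGetD si 1 0 + (j : Int) * PySem.List.pyGetD ts 1 0 + PySem.List.pyGetD ts 1 0 - 2 ^ lvl.toNat,
           lvl])) := by
  unfold create_patch_list_alt
  rw [if_neg (by omega : ¬ (ny ≤ 0 ∨ nx ≤ 0))]
  set step : Int := 2 ^ lvl.toNat with hstep
  set dx := PySem.List.pyGetD ts 0 0 with hdx
  set dy := PySem.List.pyGetD ts 1 0 with hdy
  set sx := PySem.List.pyGetD si 0 0 with hsx
  set sy := PySem.List.pyGetD si 1 0 with hsy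
  -- the row-0 cells and the row orbit
  have hfx : ∀ n : ℕ,
      (fun p => [PySem.List.pyGetD p 0 0 + dx, PySem.List.pyGetD p 1 0 + dx,
                 PySem.List.pyGetD p 2 0, PySem.List.pyGetD p 3 0, PySem.List.pyGetD p 4 0])
        ((fun i : ℕ => [sx + (i : Int) * dx, sx + (i : Int) * dx + dx - step, sy, sy + dy - step, lvl]) n)
      = (fun i : ℕ => [sx + (i : Int) * dx, sx + (i : Int) * dx + dx - step, sy, sy + dy - step, lvl]) (n + 1) := by
    intro n
    simp [PySem.List.pyGetD_ofNat']
    constructor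
    · ring
    · ring
  have hrow := cpl_last_fold
    (f := fun p => [PySem.List.pyGetD p 0 0 + dx, PySem.List.pyGetD p 1 0 + dx,
                    PySem.List.pyGetD p 2 0, PySem.List.pyGetD p 3 0, PySem.List.pyGetD p 4 0])
    (c := fun i : ℕ => [sx + (i : Int) * dx, sx + (i : Int) * dx + dx - step, sy, sy + dy - step, lvl])
    (d := ([] : List Int)) hfx (PySem.List.pyRange 0 (nx - 1) 1) 0
  simp only []
  have hinit : [[sx, sx + dx - step, sy, sy + dy - step, lvl]]
      = (List.range (0 + 1)).map (fun i : ℕ => [sx + (i : Int) * dx, sx + (i : Int) * dx + dx - step, sy, sy + dy - step, lvl]) := by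
    simp
  rw [hinit, hrow]
  have hlenx : 0 + 1 + (PySem.List.pyRange 0 (nx - 1) 1).length = nx.toNat := by
    rw [PySem.List.length_pyRange_one]
    omega
  rw [hlenx]
  -- the row orbit under the downward translation
  have hg : ∀ n : ℕ,
      (fun s : List (List Int) => s.map (fun q =>
         [PySem.List.pyGetD q 0 0, PySem.List.pyGetD q 1 0,
          PySem.List.pyGetD q 2 0 + dy, PySem.List.pyGetD q 3 0 + dy, PySem.List.pyGetD q 4 0]))
        ((fun j : ℕ => (List.range nx.toNat).map (fun i : ℕ =>
           [sx + (i : Int) * dx, sx + (i : Int) * dx + dx - step,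
            sy + (j : Int) * dy, sy + (j : Int) * dy + dy - step, lvl])) n)
      = (fun j : ℕ => (List.range nx.toNat).map (fun i : ℕ =>
           [sx + (i : Int) * dx, sx + (i : Int) * dx + dx - step,
            sy + (j : Int) * dy, sy + (j : Int) * dy + dy - step, lvl])) (n + 1) := by
    intro n
    simp only [List.map_map]
    refine List.map_congr_left ?_
    intro i _
    simp [PySem.List.pyGetD_ofNat', Function.comp]
    constructor
    · ring
    · ring
  have hr0 : (List.range nx.toNat).map (fun i : ℕ =>
        [sx + (i : Int) * dx, sx + (i : Int) * dx + dx - step, sy, sy + dy - step, lvl])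
      = (fun j : ℕ => (List.range nx.toNat).map (fun i : ℕ =>
           [sx + (i : Int) * dx, sx + (i : Int) * dx + dx - step,
            sy + (j : Int) * dy, sy + (j : Int) * dy + dy - step, lvl])) 0 := by
    simp
  have hgrid := cpl_prev_fold
    (g := fun s : List (List Int) => s.map (fun q =>
       [PySem.List.pyGetD q 0 0, PySem.List.pyGetD q 1 0,
        PySem.List.pyGetD q 2 0 + dy, PySem.List.pyGetD q 3 0 + dy, PySem.List.pyGetD q 4 0]))
    (r := fun j : ℕ => (List.range nx.toNat).map (fun i : ℕ =>
       [sx + (i : Int) * dx, sx + (i : Int) * dx + dx - step,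
        sy + (j : Int) * dy, sy + (j : Int) * dy + dy - step, lvl]))
    hg (PySem.List.pyRange 0 (ny - 1) 1) 0
  rw [hr0]
  simp only [List.range_succ, List.range_zero, List.nil_append, List.flatMap_cons, List.flatMap_nil,
    List.append_nil] at hgrid
  rw [hgrid]
  have hleny : 0 + 1 + (PySem.List.pyRange 0 (ny - 1) 1).length = ny.toNat := by
    rw [PySem.List.length_pyRange_one]
    omega
  rw [hleny]

-- ===== VERDICT (by name: the statement is the Claim_ definition above) =====
theorem create_patch_list_spec : Claim_equal_create_patch_list := by
  intro ny nx ts si lvl _ _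
  unfold Spec_create_patch_list create_patch_list
  rw [cpl_outer_fold]
  by_cases h : ny ≤ 0 ∨ nx ≤ 0
  · unfold create_patch_list_alt
    rcases h with h | h
    · simp [PySem.List.pyRange_one_eq_nil h, h]
    · simp [PySem.List.pyRange_one_eq_nil h, h]
  · have hy : 0 < ny := by omega
    have hx : 0 < nx := by omega
    rw [cpl_alt_closed ny nx ts si lvl hy hx]
    simp only [PySem.List.pyRange_one, sub_zero, List.flatMap_map, List.map_map, Function.comp_def, zero_add, List.nil_append]
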